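-- pv_equiv track=rewrite | github.com/puppyone-ai/puppyone | archived/PuppyEngine/ModularEdges/ChunkEdge/length_chunk.py | _inner_cut
-- ===== SOURCE A (Python) =====
-- from typing import List, Dict, Tuple, Optional
--
-- def _inner_cut(
--
--     chunk_size: int,
--     end_index: int,
--     remaining_text: str,
--     chunk_content: str,
--     split_chars: List[str]
-- ) -> Tuple[str, str, int]:
--     """
--     Cut the chunk content at the nearest split character and adjust the remaining text.
--     """
--
--     cut_indexes = [index for index, c in enumerate(chunk_content) if c in split_chars]
--     cut_indexes.sort(reverse=True)
--     for cut_index in cut_indexes: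
--         if cut_index != -1 and cut_index <= chunk_size:
--             end_index -= len(chunk_content) - cut_index + 1
--             cut_content = chunk_content[cut_index+1:]
--             chunk_content = chunk_content[:cut_index+1]
--             remaining_text = cut_content + remaining_text
--             break
--
--     return chunk_content, remaining_text, end_index
-- ===== SOURCE B (Python) =====
-- def _inner_cut(
--     chunk_size,
--     end_index,
--     remaining_text,
--     chunk_content,
--     split_chars,
-- ):
--     """Cut chunk_content at the last split character at index <= chunk_size."""
--     splits = set(split_chars)
--     i = min(chunk_size, len(chunk_content) - 1)
--     while i >= 0 and chunk_content[i] not in splits: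
--         i -= 1
--     if i < 0:
--         return chunk_content, remaining_text, end_index
--     end_index -= len(chunk_content) - i + 1
--     return chunk_content[:i+1], chunk_content[i+1:] + remaining_text, end_index
-- ===== Notes on version B (the rewrite author's own statement) =====
-- stated objective: faster
-- what changed: A enumerates every split-character index in the whole chunk, sorts the index list in reverse, and scans it for the first index <= chunk_size; B does a single downward scan from min(chunk_size, len-1) and stops at the first split character, with split_chars held in a set.
import Mathlib
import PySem

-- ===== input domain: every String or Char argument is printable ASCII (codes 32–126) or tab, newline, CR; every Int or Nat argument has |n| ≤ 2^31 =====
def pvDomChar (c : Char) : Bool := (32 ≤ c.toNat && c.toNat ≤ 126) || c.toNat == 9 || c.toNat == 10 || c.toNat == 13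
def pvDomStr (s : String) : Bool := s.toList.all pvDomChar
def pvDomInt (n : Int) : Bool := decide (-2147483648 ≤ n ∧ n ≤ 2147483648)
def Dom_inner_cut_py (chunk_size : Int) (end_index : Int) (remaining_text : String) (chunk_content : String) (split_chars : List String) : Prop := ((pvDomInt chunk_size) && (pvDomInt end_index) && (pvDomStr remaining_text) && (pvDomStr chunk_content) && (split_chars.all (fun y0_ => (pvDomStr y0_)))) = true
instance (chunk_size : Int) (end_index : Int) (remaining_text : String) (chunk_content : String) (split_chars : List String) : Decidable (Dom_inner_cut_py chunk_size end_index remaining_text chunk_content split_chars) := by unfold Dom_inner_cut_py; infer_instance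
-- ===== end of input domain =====

-- B replaces A's build-all-split-indices + sort(reverse=True) + scan-for-first-fit
-- by a single downward scan from min(chunk_size, len-1) for a split character.

-- ===== PORT A =====
-- the 'for cut_index in cut_indexes: if …: …; break' loop of A
def icpCutA (chunk_size : Int) (end_index : Int) (remaining_text : String) (chunk_content : String) : List Int → String × String × Int
  | [] => (chunk_content, remaining_text, end_index)
  | cut_index :: rest =>
    if cut_index ≠ -1 ∧ cut_index ≤ chunk_size then
      let end_index' := end_index - (PySem.Str.len chunk_content - cut_index + 1)
      let cut_content := PySem.Str.slice chunk_content (some (cut_index + 1)) none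
      let chunk_content' := PySem.Str.slice chunk_content none (some (cut_index + 1))
      (chunk_content', cut_content ++ remaining_text, end_index')
    else icpCutA chunk_size end_index remaining_text chunk_content rest

def inner_cut_py (chunk_size : Int) (end_index : Int) (remaining_text : String) (chunk_content : String) (split_chars : List String) : String × String × Int :=
  let cut_indexes : List Int :=
    ((PySem.List.enumerate chunk_content.toList).filter
      (fun p => split_chars.contains (String.ofList [p.2]))).map (·.1)
  let cut_indexes := PySem.List.sorted cut_indexes (fun x => x) true
  icpCutA chunk_size end_index remaining_text chunk_content cut_indexes

-- ===== PORT B =====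
-- the 'while i >= 0 and chunk_content[i] not in splits: i -= 1' loop of B
-- (pyGetD is exact here: every i the loop actually reads satisfies 0 ≤ i < len(chunk_content))
def icpScanB (splits : PySem.Set String) (cl : List Char) (i : Int) : Int :=
  if h : 0 ≤ i ∧ ¬ (PySem.Set.contains splits (String.ofList [PySem.List.pyGetD cl i ' ']) = true) then
    icpScanB splits cl (i - 1)
  else i
termination_by (i + 1).toNat
decreasing_by omega

def inner_cut_py_alt (chunk_size : Int) (end_index : Int) (remaining_text : String) (chunk_content : String) (split_chars : List String) : String × String × Int :=
  let splits := PySem.Set.ofList split_chars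
  let i := icpScanB splits chunk_content.toList (min chunk_size (PySem.Str.len chunk_content - 1))
  if i < 0 then (chunk_content, remaining_text, end_index)
  else
    let end_index' := end_index - (PySem.Str.len chunk_content - i + 1)
    (PySem.Str.slice chunk_content none (some (i + 1)),
     PySem.Str.slice chunk_content (some (i + 1)) none ++ remaining_text,
     end_index')

-- ===== PRECONDITION & SPEC =====
def Spec_inner_cut_py (chunk_size : Int) (end_index : Int) (remaining_text : String) (chunk_content : String) (split_chars : List String) (out : String × String × Int) : Prop := out = inner_cut_py_alt chunk_size end_index remaining_text chunk_content split_chars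
instance (chunk_size : Int) (end_index : Int) (remaining_text : String) (chunk_content : String) (split_chars : List String) (out : String × String × Int) : Decidable (Spec_inner_cut_py chunk_size end_index remaining_text chunk_content split_chars out) := by unfold Spec_inner_cut_py; infer_instance

-- ===== CLAIM (what is proved, stated in full; the proofs are below) =====
def Claim_equal_inner_cut_py : Prop := ∀ (chunk_size : Int) (end_index : Int) (remaining_text : String) (chunk_content : String) (split_chars : List String), Dom_inner_cut_py chunk_size end_index remaining_text chunk_content split_chars → Spec_inner_cut_py chunk_size end_index remaining_text chunk_content split_chars (inner_cut_py chunk_size end_index remaining_text chunk_content split_chars)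

-- ===== LEMMAS AND PROOFS =====

-- the predicate "character k of the chunk is a split character"
def icpP (split_chars : List String) (cl : List Char) (k : Nat) : Bool :=
  decide (String.ofList [cl.getD k ' '] ∈ split_chars)

-- generic find? lemmas
theorem icp_find?_congr {α : Type} (l : List α) (p q : α → Bool)
    (h : ∀ x ∈ l, p x = q x) : l.find? p = l.find? q := by
  induction l with
  | nil => rfl
  | cons a t ih =>
    simp only [List.find?_cons]
    rw [h a (by simp)]
    cases q a
    · exact ih (fun x hx => h x (by simp [hx]))
    · rfl

theorem icp_find?_filter {α : Type} (l : List α) (p q : α → Bool) :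
    (l.filter p).find? q = l.find? (fun x => p x && q x) := by
  induction l with
  | nil => rfl
  | cons a t ih =>
    by_cases hp : p a = true
    · simp only [List.filter_cons, hp, if_true, List.find?_cons, Bool.true_and]
      cases q a <;> simp [ih]
    · simp only [List.filter_cons, List.find?_cons]
      rw [Bool.not_eq_true] at hp
      simp [hp, ih]

-- A's cut_indexes list is the (strictly increasing) casts of the filtered index range
theorem icp_cut_indexes_eq (split_chars : List String) (cl : List Char) :
    ((PySem.List.enumerate cl).filter
       (fun p => split_chars.contains (String.ofList [p.2]))).map (·.1)
    = (((List.range cl.length).filter (icpP split_chars cl)).map (fun (k : Nat) => (k : Int))) := by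
  have h1 : (PySem.List.enumerate cl)
      = (List.range cl.length).map (fun (k : Nat) => ((k : Int), PySem.List.pyGetD cl (k : Int) ' ')) := by
    rw [PySem.List.enumerate_eq_map_pyRange cl ' ', PySem.List.len_eq,
      PySem.List.pyRange_zero_natCast, List.map_map]
    exact List.map_congr_left (fun _ _ => rfl)
  rw [h1, List.filter_map, List.map_map,
    List.filter_congr (q := icpP split_chars cl)
      (fun k hk => by simp [icpP, Function.comp])]
  exact List.map_congr_left (fun _ _ => rfl)

-- sorting an already strictly increasing Int list with reverse=True reverses it
theorem icp_sorted_rev (l : List Int) (h : l.Pairwise (· < ·)) :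
    PySem.List.sorted l (fun x => x) true = l.reverse := by
  refine PySem.List.sorted_rev_eq_of_perm_of_pairwise_gt l l.reverse (fun x => x)
    (List.reverse_perm l) ?_
  exact List.pairwise_reverse.mpr h

-- A's break-loop is a find? over the list
theorem icp_cutA_eq_find (chunk_size end_index : Int) (remaining_text chunk_content : String)
    (l : List Int) :
    icpCutA chunk_size end_index remaining_text chunk_content l =
    match l.find? (fun ci => decide (ci ≠ -1 ∧ ci ≤ chunk_size)) with
    | some ci =>
      (PySem.Str.slice chunk_content none (some (ci + 1)),
       PySem.Str.slice chunk_content (some (ci + 1)) none ++ remaining_text,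
       end_index - (PySem.Str.len chunk_content - ci + 1))
    | none => (chunk_content, remaining_text, end_index) := by
  induction l with
  | nil => rfl
  | cons a t ih =>
    simp only [icpCutA, List.find?_cons]
    by_cases h : a ≠ -1 ∧ a ≤ chunk_size
    · simp [h]
    · simp [h, ih]

-- B's scan characterised by a find? over a reversed range
theorem icp_scanB_eq (splits : PySem.Set String) (cl : List Char) (i : Int) :
    (icpScanB splits cl i < 0 ∧
       ((List.range (i + 1).toNat).reverse.find?
         (fun k => PySem.Set.contains splits (String.ofList [cl.getD k ' ']))) = none) ∨
    (∃ k : Nat,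
       ((List.range (i + 1).toNat).reverse.find?
         (fun k => PySem.Set.contains splits (String.ofList [cl.getD k ' ']))) = some k ∧
       icpScanB splits cl i = (k : Int)) := by
  generalize hm : (i + 1).toNat = m
  induction m generalizing i with
  | zero =>
    have hi : i < 0 := by omega
    left
    constructor
    · rw [icpScanB, dif_neg (by omega)]
      exact hi
    · simp
  | succ m ih =>
    have hi : 0 ≤ i := by omega
    have him : i.toNat = m := by omega
    have hget : PySem.List.pyGetD cl i ' ' = cl.getD m ' ' := by
      rw [PySem.List.pyGetD_of_nonneg cl ' ' hi, him]
    have hsplit : (List.range (m + 1)).reverse = m :: (List.range m).reverse := by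
      rw [List.range_succ, List.reverse_append]
      rfl
    rw [hsplit]
    cases hc : PySem.Set.contains splits (String.ofList [cl.getD m ' ']) with
    | true =>
      right
      refine ⟨m, List.find?_cons_of_pos hc, ?_⟩
      rw [icpScanB, dif_neg (by rw [hget]; intro hcon; exact hcon.2 hc)]
      omega
    | false =>
      rw [List.find?_cons_of_neg (by simp only [Bool.not_eq_true]; exact hc)]
      have hrec : icpScanB splits cl i = icpScanB splits cl (i - 1) := by
        rw [icpScanB, dif_pos ⟨hi, by rw [hget, hc]; simp⟩]
      rw [hrec]
      exact ih (i - 1) (by omega)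

-- membership in set(split_chars) is membership in split_chars
theorem icp_contains_ofList (l : List String) (x : String) :
    PySem.Set.contains (PySem.Set.ofList l) x = l.contains x := by
  have h1 : PySem.Set.contains (PySem.Set.ofList l) x = true ↔ x ∈ l := by
    rw [show PySem.Set.contains (PySem.Set.ofList l) x
          = List.contains (PySem.Set.ofList l) x from rfl, List.contains_iff_mem]
    exact PySem.Set.mem_ofList l x
  rw [← List.contains_iff_mem] at h1
  exact Bool.coe_iff_coe.mp h1

-- clipping the scanned range: the '≤ chunk_size' guard over range N equals the
-- unguarded search over the clipped range
theorem icp_range_clip (N : Nat) (cs : Int) (P : Nat → Bool) :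
    ((List.range N).reverse.find? (fun k => P k && decide ((k : Int) ≤ cs)))
    = ((List.range (min cs ((N : Int) - 1) + 1).toNat).reverse.find? P) := by
  by_cases hcs : cs < 0
  · have hM : (min cs ((N : Int) - 1) + 1).toNat = 0 := by omega
    rw [hM]
    simp only [List.range_zero, List.reverse_nil, List.find?_nil]
    apply List.find?_eq_none.mpr
    intro k hk
    simp only [Bool.and_eq_true, decide_eq_true_eq, not_and]
    intro _
    omega
  · rw [Int.not_lt] at hcs
    set M : Nat := (min cs ((N : Int) - 1) + 1).toNat with hMdef
    have hMN : M ≤ N := by omega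
    have hMint : (M : Int) = min cs ((N : Int) - 1) + 1 := by omega
    have hN : N = M + (N - M) := by omega
    conv_lhs => rw [hN, List.range_add]
    rw [List.reverse_append, List.find?_append]
    have h1 : (((List.range (N - M)).map (fun x => M + x)).reverse.find?
        (fun k => P k && decide ((k : Int) ≤ cs))) = none := by
      apply List.find?_eq_none.mpr
      intro k hk
      simp only [List.mem_reverse, List.mem_map] at hk
      obtain ⟨a, ha, rfl⟩ := hk
      have haN : a < N - M := List.mem_range.mp ha
      simp only [Bool.and_eq_true, decide_eq_true_eq, not_and]
      intro _
      push_cast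
      omega
    rw [h1, Option.none_or]
    apply icp_find?_congr
    intro k hk
    have hkM : k < M := List.mem_range.mp (List.mem_reverse.mp hk)
    have hdec : decide ((k : Int) ≤ cs) = true := by
      simp only [decide_eq_true_eq]
      omega
    rw [hdec, Bool.and_true]

-- ===== VERDICT (by name: the statement is the Claim_ definition above) =====
theorem inner_cut_py_spec : Claim_equal_inner_cut_py := by
  intro chunk_size end_index remaining_text chunk_content split_chars _
  unfold Spec_inner_cut_py inner_cut_py inner_cut_py_alt
  simp only []  -- zeta-reduce the let-bindings
  rw [icp_cut_indexes_eq]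
  have hpw : ((((List.range chunk_content.toList.length).filter
      (icpP split_chars chunk_content.toList)).map (fun (k : Nat) => (k : Int)))).Pairwise (· < ·) := by
    refine List.Pairwise.map _ (fun a b h => by exact_mod_cast h) ?_
    exact List.Pairwise.filter _ List.pairwise_lt_range
  rw [icp_sorted_rev _ hpw, icp_cutA_eq_find, ← List.map_reverse, ← List.filter_reverse,
    List.find?_map, icp_find?_filter,
    icp_find?_congr _ _
      (fun k => icpP split_chars chunk_content.toList k && decide ((k : Int) ≤ chunk_size))
      (fun k _ => by simp [Function.comp]),
    icp_range_clip]
  simp only [PySem.Str.len_eq]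
  have hs := icp_scanB_eq (PySem.Set.ofList split_chars) chunk_content.toList
    (min chunk_size ((chunk_content.toList.length : Int) - 1))
  have hpred : (fun k => PySem.Set.contains (PySem.Set.ofList split_chars)
      (String.ofList [chunk_content.toList.getD k ' ']))
      = icpP split_chars chunk_content.toList := by
    funext k
    rw [icp_contains_ofList, icpP, List.contains_eq_mem]
  rw [hpred] at hs
  rcases hs with ⟨hneg, hnone⟩ | ⟨k, hfind, hscan⟩
  · rw [hnone]
    simp only [Option.map_none]
    rw [if_pos hneg]
  · rw [hfind]
    simp only [Option.map_some]
    rw [hscan, if_neg (by omega)]
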